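-- pv_equiv track=rewrite | github.com/yhoo0007/string-algos | solutions/q3/modified_kmp.py | get_spx
-- ===== SOURCE A (Python) =====
-- ALPHABET = [chr(i) for i in range(128)]  # all ascii characters
--
-- def z_algo(string):
--     '''
--     Performs Gusfield's Z-algorithm on the given string and returns the resulting Z-array.
--         string: String of characters as input to the Z-algorithm.
--         Time:   O(n)
--         Space:  O(n)
--             where:
--             n = length of 'string'
--     '''
--     if not hasattr(string, '__len__'):
--         string = list(string)
--
--     n = len(string)
--     if n == 0:
--         return []
--
--     z = [0 for _ in range(n)]
--     z[0] = n
--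
--     l, r = 0, 0
--     for i in range(1, n):
--         if i > r:  # case 1 : i not in zbox, explicit comparisons until mismatch is found
--             j = i
--             while j < n and string[j] == string[j - i]:
--                 z[i] += 1
--                 j += 1
--
--             if z[i] > 0:  # form zbox if number of matches > 0
--                 l, r = i, j - 1
--         else:
--             k = i - l
--             remaining = r - i + 1
--             if z[k] < remaining:  # case 2a : z[k] < remaining
--                 z[i] = z[k]
--
--             elif z[k] > remaining:  # case 2b : z[k] > remaining
--                 z[i] = remaining
--
--             else:  # case 2c : z[k] = remaining, explicit comparisons from r + 1 until mismatch is found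
--                 z[i] = z[k]
--                 matches = 0
--                 j = r + 1
--                 k = z[i]
--                 while j < n and string[j] == string[k]:
--                     z[i] += 1
--                     matches += 1
--                     j += 1
--                     k += 1
--
--                 if matches > 0:  # form new zbox if number of matches > 0
--                     l, r = i, j - 1
--     return z
--
-- def get_spx(pat):
--     '''
--     Returns a 2D spix lookup table to be used in the KMP algorithm. Lookup table is computed
--     running z algorithm on the given string and placing the z values into a 2D lookup table such
--     that they can be looked up by the mismatched character.
--         pat:    String of characters representing pattern to be processed
--     '''
--     m = len(pat)
--     spx = [None for _ in range(len(ALPHABET))]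
--     z_array = z_algo(pat)
--     for j in range(m - 1, 0, -1):
--         if z_array[j] > 0:
--             i = j + z_array[j] - 1
--             char_idx = ord(pat[z_array[j]])
--             if spx[char_idx] is None:  # only allocate array of necessary letters
--                 spx[char_idx] = [-1 for _ in range(len(pat) + 1)]
--             spx[char_idx][i] = z_array[j]
--     return spx
-- ===== SOURCE B (Python) =====
-- ALPHABET = [chr(i) for i in range(128)]  # all ascii characters
--
-- def z_naive(pat):
--     '''Naive O(m^2) Z-array: z[i] = match count of pat[i:] against pat.'''
--     n = len(pat)
--     z = [0] * n
--     if n: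
--         z[0] = n
--     for i in range(1, n):
--         k = 0
--         while i + k < n and pat[i + k] == pat[k]:
--             k += 1
--         z[i] = k
--     return z
--
-- def get_spx(pat):
--     m = len(pat)
--     spx = [None for _ in range(len(ALPHABET))]
--     z_array = z_naive(pat)
--     for j in range(m - 1, 0, -1):
--         if z_array[j] > 0:
--             i = j + z_array[j] - 1
--             char_idx = ord(pat[z_array[j]])
--             if spx[char_idx] is None:
--                 spx[char_idx] = [-1 for _ in range(len(pat) + 1)]
--             spx[char_idx][i] = z_array[j]
--     return spx
-- ===== Notes on version B (the rewrite author's own statement) =====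
-- stated objective: simpler
-- what changed: The Z-array helper is replaced: Gusfield's O(m) Z-algorithm with its l/r z-box case analysis becomes a plain naive double loop that counts prefix matches directly for each position; the table-filling loop is kept.
import Mathlib
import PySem

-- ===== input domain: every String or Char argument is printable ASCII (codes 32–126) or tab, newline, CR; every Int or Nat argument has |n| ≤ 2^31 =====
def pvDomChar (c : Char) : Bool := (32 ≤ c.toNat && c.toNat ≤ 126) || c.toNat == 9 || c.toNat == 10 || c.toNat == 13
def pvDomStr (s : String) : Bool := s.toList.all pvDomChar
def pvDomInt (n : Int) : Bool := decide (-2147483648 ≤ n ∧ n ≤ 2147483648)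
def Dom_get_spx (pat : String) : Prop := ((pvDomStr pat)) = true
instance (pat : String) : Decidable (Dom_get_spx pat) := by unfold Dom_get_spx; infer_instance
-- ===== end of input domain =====

-- B replaces Gusfield's O(m) Z-algorithm by a naive quadratic per-position prefix-match count
-- producing the same Z-array; the table-filling loop is unchanged (objective: simpler).

-- ===== PORT A =====

-- the explicit-comparison while loops of z_algo: count of matches comparing s[j..] with s[k..]
-- while j < n (in every call k < j, so s.getD k is a real access)
-- structural recursion on fuel = s.length - j; the guard j < s.length fails exactly when the
-- fuel would run out, so the fuel never truncates the Python loop (exact)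
def extAF (s : List Char) (fuel j k : Nat) : Nat :=
  match fuel with
  | 0 => 0
  | fuel + 1 =>
    if j < s.length ∧ s.getD j ' ' = s.getD k ' ' then extAF s fuel (j+1) (k+1) + 1 else 0

def extA (s : List Char) (j k : Nat) : Nat := extAF s (s.length - j) j k

-- one iteration of z_algo's main for-loop; state (z, l, r)
def zStep (s : List Char) (st : List Nat × Nat × Nat) (i : Nat) : List Nat × Nat × Nat :=
  let z := st.1; let l := st.2.1; let r := st.2.2
  if i > r then
    -- case 1: explicit comparisons s[j] == s[j-i] from j = i
    let c := extA s i 0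
    let z := z.set i c
    if c > 0 then (z, i, i + c - 1) else (z, l, r)
  else
    let k := i - l
    let rem := r - i + 1
    let zk := z.getD k 0
    if zk < rem then (z.set i zk, l, r)            -- case 2a
    else if zk > rem then (z.set i rem, l, r)      -- case 2b
    else
      -- case 2c: explicit comparisons from j = r + 1, k = z[i] = zk
      let c := extA s (r+1) zk
      let z := z.set i (zk + c)
      if c > 0 then (z, i, r + c) else (z, l, r)

def z_algo (s : List Char) : List Nat :=
  if s.length = 0 then []
  else ((List.range' 1 (s.length - 1)).foldl (zStep s)
          ((List.replicate s.length 0).set 0 s.length, 0, 0)).1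

-- the table-filling for-loop, verbatim identical in A and B (for j in range(m-1, 0, -1): ...)
def spxTable (s : List Char) (z : List Nat) : List (Option (List Int)) :=
  let m := s.length
  (List.range' 1 (m-1)).reverse.foldl (fun spx j =>
    let zj := z.getD j 0
    if zj > 0 then
      let i := j + zj - 1
      let ci := (s.getD zj ' ').toNat
      let row := match spx.getD ci none with
        | none => List.replicate (m+1) (-1 : Int)      -- lazy allocation
        | some row => row
      spx.set ci (some (row.set i (zj : Int)))
    else spx) (List.replicate 128 none)

def get_spx (pat : String) : List (Option (List Int)) :=
  spxTable pat.toList (z_algo pat.toList)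

-- ===== PORT B =====

-- B's inner while loop: k starts at 0, counts matches pat[i+k] == pat[k]
-- structural recursion on fuel = s.length - (i+k); the guard i + k < s.length fails exactly
-- when the fuel would run out, so the fuel never truncates the Python loop (exact)
def znaiveF (s : List Char) (fuel i k : Nat) : Nat :=
  match fuel with
  | 0 => 0
  | fuel + 1 =>
    if i + k < s.length ∧ s.getD (i+k) ' ' = s.getD k ' ' then znaiveF s fuel i (k+1) + 1 else 0

def znaive_count (s : List Char) (i k : Nat) : Nat := znaiveF s (s.length - (i+k)) i k

def z_naive (s : List Char) : List Nat :=
  let n := s.length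
  (List.range n).map (fun i => if i = 0 then n else znaive_count s i 0)

def get_spx_alt (pat : String) : List (Option (List Int)) :=
  spxTable pat.toList (z_naive pat.toList)

-- ===== PRECONDITION & SPEC =====
def Spec_get_spx (pat : String) (out : List (Option (List Int))) : Prop := out = get_spx_alt pat
instance (pat : String) (out : List (Option (List Int))) : Decidable (Spec_get_spx pat out) := by unfold Spec_get_spx; infer_instance

-- ===== CLAIM (what is proved, stated in full; the proofs are below) =====
def Claim_equal_get_spx : Prop := ∀ (pat : String), Dom_get_spx pat → Spec_get_spx pat (get_spx pat)


-- ===== LEMMAS AND PROOFS =====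

-- matches below the run length of extAF
theorem extAF_match (s : List Char) : ∀ fuel t j k, t < extAF s fuel j k →
    j + t < s.length ∧ s.getD (j+t) ' ' = s.getD (k+t) ' ' := by
  intro fuel
  induction fuel with
  | zero => intro t j k h; simp [extAF] at h
  | succ fuel ih =>
    intro t j k h
    rw [extAF] at h
    split at h
    · next hc =>
      match t with
      | 0 => simpa using hc
      | t + 1 =>
        have h' := ih t (j+1) (k+1) (by omega)
        have e1 : j + 1 + t = j + (t+1) := by omega
        have e2 : k + 1 + t = k + (t+1) := by omega
        rw [e1, e2] at h'
        exact h'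
    · omega

theorem extA_match (s : List Char) : ∀ t j k, t < extA s j k →
    j + t < s.length ∧ s.getD (j+t) ' ' = s.getD (k+t) ' ' := by
  intro t j k h
  exact extAF_match s (s.length - j) t j k h

-- the run stops exactly at extAF: the next comparison fails (given enough fuel)
theorem extAF_stop (s : List Char) : ∀ fuel j k, s.length ≤ j + fuel →
    ¬ (j + extAF s fuel j k < s.length ∧
       s.getD (j + extAF s fuel j k) ' ' = s.getD (k + extAF s fuel j k) ' ') := by
  intro fuel
  induction fuel with
  | zero =>
    intro j k hf
    rw [extAF]
    rintro ⟨h1, _⟩; omega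
  | succ fuel ih =>
    intro j k hf
    rw [extAF]
    split
    · next hc =>
      have h' := ih (j+1) (k+1) (by omega)
      have e1 : j + 1 + extAF s fuel (j+1) (k+1) = j + (extAF s fuel (j+1) (k+1) + 1) := by omega
      have e2 : k + 1 + extAF s fuel (j+1) (k+1) = k + (extAF s fuel (j+1) (k+1) + 1) := by omega
      rw [e1, e2] at h'
      exact h'
    · next hc => simpa using hc

theorem extA_stop (s : List Char) (j k : Nat) :
    ¬ (j + extA s j k < s.length ∧ s.getD (j + extA s j k) ' ' = s.getD (k + extA s j k) ' ') :=
  extAF_stop s (s.length - j) j k (by omega)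

-- uniqueness: a value with the match/stop properties is extAF (given enough fuel)
theorem extAF_eq_of (s : List Char) : ∀ c fuel j k, s.length ≤ j + fuel →
    (∀ t, t < c → j + t < s.length ∧ s.getD (j+t) ' ' = s.getD (k+t) ' ') →
    ¬ (j + c < s.length ∧ s.getD (j+c) ' ' = s.getD (k+c) ' ') →
    extAF s fuel j k = c := by
  intro c
  induction c with
  | zero =>
    intro fuel j k hf _ hs
    match fuel with
    | 0 => rw [extAF]
    | fuel + 1 => rw [extAF, if_neg (by simpa using hs)]
  | succ c ih =>
    intro fuel j k hf hm hs
    have h0 := hm 0 (by omega)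
    match fuel with
    | 0 => omega
    | fuel + 1 =>
      rw [extAF, if_pos (by simpa using h0)]
      have hrec : extAF s fuel (j+1) (k+1) = c := by
        apply ih fuel (j+1) (k+1) (by omega)
        · intro t ht
          have h' := hm (t+1) (by omega)
          have e1 : j + (t+1) = j + 1 + t := by omega
          have e2 : k + (t+1) = k + 1 + t := by omega
          rw [e1, e2] at h'
          exact h'
        · have e1 : j + (c+1) = j + 1 + c := by omega
          have e2 : k + (c+1) = k + 1 + c := by omega
          rw [e1, e2] at hs
          exact hs
      omega

theorem extA_eq_of (s : List Char) : ∀ c j k,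
    (∀ t, t < c → j + t < s.length ∧ s.getD (j+t) ' ' = s.getD (k+t) ' ') →
    ¬ (j + c < s.length ∧ s.getD (j+c) ' ' = s.getD (k+c) ' ') →
    extA s j k = c := by
  intro c j k hm hs
  exact extAF_eq_of s c (s.length - j) j k (by omega) hm hs

theorem extA_le (s : List Char) (j k : Nat) : extA s j k ≤ s.length - j := by
  by_cases h : extA s j k = 0
  · omega
  · have := (extA_match s (extA s j k - 1) j k (by omega)).1
    omega

-- B's while loop counts the same run (same guard, written through the counter k)
theorem znaiveF_eq_extAF (s : List Char) : ∀ fuel i k, znaiveF s fuel i k = extAF s fuel (i+k) k := by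
  intro fuel
  induction fuel with
  | zero => intro i k; rw [znaiveF, extAF]
  | succ fuel ih =>
    intro i k
    rw [znaiveF, extAF]
    by_cases hc : i + k < s.length ∧ s.getD (i+k) ' ' = s.getD k ' '
    · rw [if_pos hc, if_pos hc, ih]
      have e : i + (k+1) = i + k + 1 := by omega
      rw [e]
    · rw [if_neg hc, if_neg hc]

theorem znaive_eq_extA (s : List Char) (i : Nat) : znaive_count s i 0 = extA s i 0 := by
  unfold znaive_count extA
  rw [znaiveF_eq_extAF]
  simp only [Nat.add_zero]

-- the intended content of the z-array after the first i positions have been processed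
def hFun (s : List Char) (i : Nat) : Nat → Nat :=
  fun j => if j = 0 then s.length else if j < i then extA s j 0 else 0

-- loop invariant of z_algo's main loop: processed prefix is correct, and when a z-box
-- [l, r] is live (l ≥ 1) it is exactly the maximal prefix-match at l: extA s l 0 = r - l + 1
def ZInv (s : List Char) (i : Nat) (st : List Nat × Nat × Nat) : Prop :=
  st.1 = (List.range s.length).map (hFun s i)
  ∧ st.2.1 ≤ st.2.2 ∧ st.2.2 < s.length ∧ st.2.1 < i
  ∧ (st.2.1 = 0 → st.2.2 = 0)
  ∧ (1 ≤ st.2.1 → extA s st.2.1 0 = st.2.2 - st.2.1 + 1)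

theorem mapRange_getD (n : Nat) (h : Nat → Nat) (k : Nat) (hk : k < n) :
    ((List.range n).map h).getD k 0 = h k := by
  rw [List.getD_eq_getElem?_getD]
  simp [hk]

theorem mapRange_set (n : Nat) (h : Nat → Nat) (k v : Nat) :
    ((List.range n).map h).set k v = (List.range n).map (fun j => if j = k then v else h j) := by
  apply List.ext_getElem
  · simp
  · intro i h1 h2
    simp only [List.getElem_set, List.getElem_map, List.getElem_range]
    have hi : i < n := by simpa using h1
    by_cases hik : i = k
    · simp [hik]
    · rw [if_neg (by omega), if_neg hik]

-- the new z-list after writing the correct value at position i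
theorem set_hFun (s : List Char) (i : Nat) (hi1 : 1 ≤ i) (hin : i < s.length) :
    ((List.range s.length).map (hFun s i)).set i (extA s i 0)
      = (List.range s.length).map (hFun s (i+1)) := by
  rw [mapRange_set]
  apply List.map_congr_left
  intro j hj
  have hjn : j < s.length := List.mem_range.mp hj
  unfold hFun
  by_cases hji : j = i
  · subst hji
    rw [if_pos rfl, if_neg (by omega), if_pos (by omega)]
  · rw [if_neg hji]
    by_cases hj0 : j = 0
    · simp [hj0]
    · rw [if_neg hj0, if_neg hj0]
      by_cases hlt : j < i
      · rw [if_pos hlt, if_pos (by omega)]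
      · rw [if_neg hlt, if_neg (by omega)]

theorem zStep_inv (s : List Char) (i : Nat) (st : List Nat × Nat × Nat)
    (h1 : 1 ≤ i) (h2 : i < s.length) (hinv : ZInv s i st) :
    ZInv s (i+1) (zStep s st i) := by
  obtain ⟨z, l, r⟩ := st
  obtain ⟨hz, hlr, hrn, hli, hl0, hbox⟩ := hinv
  simp only at hz hlr hrn hli hl0 hbox
  simp only [zStep]
  by_cases hir : i > r
  · rw [if_pos hir]
    have hset : z.set i (extA s i 0) = (List.range s.length).map (hFun s (i+1)) := by
      rw [hz]; exact set_hFun s i h1 h2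
    by_cases hc : extA s i 0 > 0
    · rw [if_pos hc]
      dsimp only [ZInv]
      refine ⟨hset, by omega, ?_, by omega, by omega, ?_⟩
      · have := (extA_match s (extA s i 0 - 1) i 0 (by omega)).1
        omega
      · intro _
        omega
    · rw [if_neg hc]
      dsimp only [ZInv]
      exact ⟨hset, hlr, hrn, by omega, hl0, hbox⟩
  · rw [if_neg hir]
    have hil : i ≤ r := by omega
    have hl1 : 1 ≤ l := by
      by_contra hcon
      have : l = 0 := by omega
      have := hl0 this
      omega
    have hk1 : 1 ≤ i - l := by omega
    have hki : i - l < i := by omega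
    have hzk : z.getD (i - l) 0 = extA s (i - l) 0 := by
      rw [hz, mapRange_getD _ _ _ (by omega)]
      unfold hFun
      rw [if_neg (by omega), if_pos hki]
    have hE := hbox hl1
    -- matches inside the box: s[l+t] = s[t] for t ≤ r - l
    have hboxm : ∀ t, t ≤ r - l → l + t < s.length ∧ s.getD (l+t) ' ' = s.getD t ' ' := by
      intro t ht
      have := extA_match s t l 0 (by omega)
      simpa using this
    -- mismatch just past the box
    have hboxs : ¬ (r + 1 < s.length ∧ s.getD (r+1) ' ' = s.getD (r+1-l) ' ') := by
      have := extA_stop s l 0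
      rw [hE] at this
      have e1 : l + (r - l + 1) = r + 1 := by omega
      have e2 : 0 + (r - l + 1) = r + 1 - l := by omega
      rw [e1, e2] at this
      exact this
    -- matches of the earlier entry k = i - l
    have hkm := extA_match s
    have hks := extA_stop s (i - l) 0
    set zk := extA s (i - l) 0 with hzkdef
    have hzkle : zk ≤ s.length - (i - l) := extA_le s (i - l) 0
    rw [hzk]
    by_cases hca : zk < r - i + 1
    · -- case 2a : z[i] = z[k]
      rw [if_pos hca]
      have hval : extA s i 0 = zk := by
        apply extA_eq_of
        · intro t ht
          have hk' := extA_match s t (i - l) 0 (by omega)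
          simp only [Nat.zero_add] at hk'
          have hb := hboxm (i - l + t) (by omega)
          have e : l + (i - l + t) = i + t := by omega
          rw [e] at hb
          refine ⟨hb.1, ?_⟩
          rw [hb.2, Nat.zero_add]
          exact hk'.2
        · have hk' := extA_stop s (i - l) 0
          rw [← hzkdef] at hk'
          simp only [Nat.zero_add] at hk'
          have hkzn : i - l + zk < s.length := by omega
          have hb := hboxm (i - l + zk) (by omega)
          have e : l + (i - l + zk) = i + zk := by omega
          rw [e] at hb
          rintro ⟨hlt, heq⟩
          apply hk'
          refine ⟨hkzn, ?_⟩
          rw [← hb.2]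
          simpa using heq
      dsimp only [ZInv]
      refine ⟨?_, hlr, hrn, by omega, hl0, hbox⟩
      rw [hz, ← hval]
      exact set_hFun s i h1 h2
    · rw [if_neg hca]
      by_cases hcb : zk > r - i + 1
      · -- case 2b : z[i] = remaining
        rw [if_pos hcb]
        have hval : extA s i 0 = r - i + 1 := by
          apply extA_eq_of
          · intro t ht
            have hk' := extA_match s t (i - l) 0 (by omega)
            simp only [Nat.zero_add] at hk'
            have hb := hboxm (i - l + t) (by omega)
            have e : l + (i - l + t) = i + t := by omega
            rw [e] at hb
            exact ⟨hb.1, by rw [hb.2, Nat.zero_add]; exact hk'.2⟩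
          · have e : i + (r - i + 1) = r + 1 := by omega
            rw [e]
            rintro ⟨hlt, heq⟩
            apply hboxs
            refine ⟨hlt, ?_⟩
            have hk' := extA_match s (r - i + 1) (i - l) 0 (by omega)
            simp only [Nat.zero_add] at hk'
            have e2 : i - l + (r - i + 1) = r + 1 - l := by omega
            rw [e2] at hk'
            rw [heq, Nat.zero_add, ← hk'.2]
        dsimp only [ZInv]
        refine ⟨?_, hlr, hrn, by omega, hl0, hbox⟩
        rw [hz, ← hval]
        exact set_hFun s i h1 h2
      · -- case 2c : zk = remaining; extend from r+1
        have hceq : zk = r - i + 1 := by omega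
        rw [if_neg hcb]
        set c := extA s (r+1) zk with hcdef
        have hval : extA s i 0 = zk + c := by
          apply extA_eq_of
          · intro t ht
            simp only [Nat.zero_add]
            by_cases htr : t < r - i + 1
            · have hk' := extA_match s t (i - l) 0 (by omega)
              simp only [Nat.zero_add] at hk'
              have hb := hboxm (i - l + t) (by omega)
              have e : l + (i - l + t) = i + t := by omega
              rw [e] at hb
              exact ⟨hb.1, by rw [hb.2]; exact hk'.2⟩
            · have hu : t - (r - i + 1) < c := by omega
              have hm' := extA_match s (t - (r - i + 1)) (r+1) zk hu
              have e1 : r + 1 + (t - (r - i + 1)) = i + t := by omega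
              have e2 : zk + (t - (r - i + 1)) = t := by omega
              rw [e1, e2] at hm'
              exact hm'
          · have hs' := extA_stop s (r+1) zk
            rw [← hcdef] at hs'
            have e1 : i + (zk + c) = r + 1 + c := by omega
            rw [e1, Nat.zero_add]
            exact hs'
        by_cases hc : c > 0
        · rw [if_pos hc]
          dsimp only [ZInv]
          refine ⟨?_, by omega, ?_, by omega, by omega, ?_⟩
          · rw [hz, ← hval]
            exact set_hFun s i h1 h2
          · have := (extA_match s (c - 1) (r+1) zk (by omega)).1
            omega
          · intro _
            rw [hval]
            omega
        · rw [if_neg hc]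
          dsimp only [ZInv]
          refine ⟨?_, hlr, hrn, by omega, hl0, hbox⟩
          rw [hz, ← hval]
          exact set_hFun s i h1 h2

theorem zLoop_inv (s : List Char) : ∀ cnt i st, 1 ≤ i → i + cnt = s.length → ZInv s i st →
    ZInv s (i + cnt) ((List.range' i cnt).foldl (zStep s) st) := by
  intro cnt
  induction cnt with
  | zero => intro i st _ _ h; simpa using h
  | succ cnt ih =>
    intro i st h1 h2 hinv
    rw [List.range'_succ, List.foldl_cons]
    have h' := ih (i+1) (zStep s st i) (by omega) (by omega)
      (zStep_inv s i st h1 (by omega) hinv)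
    have e : i + (cnt + 1) = i + 1 + cnt := by omega
    rw [e]
    exact h'

theorem z_eq (s : List Char) : z_algo s = z_naive s := by
  unfold z_algo z_naive
  by_cases hn : s.length = 0
  · simp [hn]
  · rw [if_neg hn]
    have hinit : ZInv s 1 ((List.replicate s.length 0).set 0 s.length, 0, 0) := by
      dsimp only [ZInv]
      refine ⟨?_, by omega, by omega, by omega, fun _ => rfl, by omega⟩
      apply List.ext_getElem
      · simp
      · intro i hi1 hi2
        simp only [List.getElem_set, List.getElem_replicate, List.getElem_map, List.getElem_range]
        unfold hFun
        by_cases hi0 : i = 0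
        · simp [hi0]
        · rw [if_neg (by omega), if_neg hi0, if_neg (by omega)]
    have hfin := zLoop_inv s (s.length - 1) 1 _ (by omega) (by omega) hinit
    rw [hfin.1]
    apply List.map_congr_left
    intro j hj
    have hjn : j < s.length := List.mem_range.mp hj
    unfold hFun
    by_cases hj0 : j = 0
    · simp [hj0]
    · rw [if_neg hj0, if_pos (by omega), if_neg hj0, znaive_eq_extA]

-- ===== VERDICT (by name: the statement is the Claim_ definition above) =====
theorem get_spx_spec : Claim_equal_get_spx := by
  intro pat _
  show get_spx pat = get_spx_alt pat
  unfold get_spx get_spx_alt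
  rw [z_eq]
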